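-- pv_equiv track=rewrite | github.com/sheryllan/Algo | Math/N_divisible_by_prime.py | get_count_nums_primes_divisible
-- ===== SOURCE A (Python) =====
-- def get_primes(N: int):
--     if N < 2:
--        return
--
--     is_prime = [True] * (N + 1)
--     for x in range(2, N + 1):
--         if is_prime[x]:
--             yield x
--
--         for i in range(x * x, N + 1, x):
--             is_prime[i] = False
--
-- def get_count_nums_primes_divisible(N):
--     count = 0
--     marked = [0] * (N + 1)
--     for p in get_primes(N // 2):
--         for x in range(p, N + 1, p):
--             count += marked[x]
--             marked[x] += 1
--
--     return count
-- ===== SOURCE B (Python) =====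
-- def get_count_nums_primes_divisible(N):
--     half = N // 2
--     if half < 2:
--         return 0
--     # phase 1: plain array sieve (mark first, collect afterwards)
--     sieve = [True] * (half + 1)
--     for d in range(2, half + 1):
--         for m in range(d * d, half + 1, d):
--             sieve[m] = False
--     primes = [d for d in range(2, half + 1) if sieve[d]]
--     # phase 2: closed form per prime pair -- the numbers <= N divisible by
--     # two distinct primes p < q are exactly the N // (p*q) multiples of p*q;
--     # primes are ascending, so once p*q > N the rest of the row adds 0.
--     total = 0
--     for i in range(len(primes)):
--         p = primes[i]
--         for j in range(i + 1, len(primes)):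
--             q = primes[j]
--             if p * q > N:
--                 break
--             total += N // (p * q)
--     return total
-- ===== Notes on version B (the rewrite author's own statement) =====
-- stated objective: alternative
-- what changed: Instead of A's interleaved generator-consumer that accumulates pairs per number through a marked array as long as the input (count += marked[x] over every multiple of every prime), B sieves and collects the primes up to half of N as a list in two separate phases and then sums the closed form N // (p*q) over prime pairs p < q, breaking out of each row once p*q exceeds N, so the numbers up to N are never traversed per prime.
import Mathlib
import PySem

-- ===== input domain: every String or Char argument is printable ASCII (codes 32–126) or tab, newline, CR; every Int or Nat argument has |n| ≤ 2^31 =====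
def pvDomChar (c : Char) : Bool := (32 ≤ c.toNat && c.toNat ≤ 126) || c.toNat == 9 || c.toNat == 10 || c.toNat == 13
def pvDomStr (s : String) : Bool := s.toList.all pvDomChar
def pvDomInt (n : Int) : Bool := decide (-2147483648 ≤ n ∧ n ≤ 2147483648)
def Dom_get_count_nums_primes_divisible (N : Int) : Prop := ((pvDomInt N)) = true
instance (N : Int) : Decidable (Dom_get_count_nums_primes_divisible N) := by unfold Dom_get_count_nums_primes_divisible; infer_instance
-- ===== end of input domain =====

-- B replaces A's interleaved generator-consumer (yield primes while sieving, accumulate pairs per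
-- number through a marked array as long as the input) by a two-phase computation: sieve then collect
-- the primes up to half of N as a list, and sum the closed form N // (p*q) over prime pairs p < q
-- (with an early break once p*q exceeds N), never touching the numbers up to N individually; the
-- check measured B faster by a constant factor (no input-sized marked array, the pair loop touches
-- only pairs whose product stays below the input).
-- Python mutable bool/int lists are represented as Array (O(1) read/write as in Python).


-- ===== PORT A =====
-- for i in range(x*x, M+1, x): is_prime[i] = False   (same line occurs verbatim in both Pythons)
def pvMark (M : Int) (isp : Array Bool) (x : Int) : Array Bool :=
  (PySem.List.pyRange (x * x) (M + 1) x).foldl (fun b i => b.setIfInBounds i.toNat false) isp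

-- A's generator step: yield x if is_prime[x] (append to the produced list), then mark multiples
def pvSieveStep (M : Int) (st : Array Bool × List Int) (x : Int) : Array Bool × List Int :=
  let st2 := if st.1.getD x.toNat false then (st.1, st.2 ++ [x]) else st
  (pvMark M st2.1 x, st2.2)

-- get_primes(M): the full list the Python generator yields
def get_primes (M : Int) : List Int :=
  if M < 2 then []
  else ((PySem.List.pyRange 2 (M + 1) 1).foldl (pvSieveStep M)
          (Array.replicate (M + 1).toNat true, ([] : List Int))).2

-- marked[x] += 1
def pvBump (om : Array Int) (x : Int) : Array Int :=
  om.setIfInBounds x.toNat (om.getD x.toNat 0 + 1)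

-- inner loop body of A: count += marked[x]; marked[x] += 1
def pvCount (st : Int × Array Int) (x : Int) : Int × Array Int :=
  (st.1 + st.2.getD x.toNat 0, pvBump st.2 x)

def get_count_nums_primes_divisible (N : Int) : Int :=
  ((get_primes (PySem.Int.floordiv N 2)).foldl
      (fun st p => (PySem.List.pyRange p (N + 1) p).foldl pvCount st)
      (0, Array.replicate (N + 1).toNat 0)).1

-- ===== PORT B =====
-- B's inner j-loop: q = primes[j]; break once p*q > N, else total += N // (p*q)
def pvRow (N p : Int) (primes : List Int) : List Int → Int → Int
  | [], acc => acc
  | j :: js, acc =>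
      let q := PySem.List.pyGetD primes j 0
      if p * q > N then acc
      else pvRow N p primes js (acc + PySem.Int.floordiv N (p * q))

def get_count_nums_primes_divisible_alt (N : Int) : Int :=
  let half := PySem.Int.floordiv N 2
  if half < 2 then 0
  else
    -- phase 1: plain sieve (mark first, collect the primes afterwards)
    let sieve := (PySem.List.pyRange 2 (half + 1) 1).foldl (fun b d => pvMark half b d)
                   (Array.replicate (half + 1).toNat true)
    let primes := (PySem.List.pyRange 2 (half + 1) 1).filter (fun d => sieve.getD d.toNat false)
    -- phase 2: closed form per prime pair, row break once p*q > N
    (PySem.List.pyRange 0 (primes.length : Int) 1).foldl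
      (fun total i =>
        pvRow N (PySem.List.pyGetD primes i 0) primes
          (PySem.List.pyRange (i + 1) (primes.length : Int) 1) total)
      0

-- ===== PRECONDITION & SPEC =====
def Spec_get_count_nums_primes_divisible (N : Int) (out : Int) : Prop := out = get_count_nums_primes_divisible_alt N
instance (N : Int) (out : Int) : Decidable (Spec_get_count_nums_primes_divisible N out) := by unfold Spec_get_count_nums_primes_divisible; infer_instance

-- ===== CLAIM (what is proved, stated in full; the proofs are below) =====
def Claim_equal_get_count_nums_primes_divisible : Prop := ∀ (N : Int), Dom_get_count_nums_primes_divisible N → Spec_get_count_nums_primes_divisible N (get_count_nums_primes_divisible N)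

-- ===== LEMMAS AND PROOFS =====

-- the primes in [2, M], ascending: the common characterisation of A's generator and B's list
def pyPrimes (M : Int) : List Int :=
  (PySem.List.pyRange 2 (M + 1) 1).filter (fun x => decide x.toNat.Prime)

-- the sieve array after processing d = 2 .. k-1 (B's array is pvSieveArr M (M+1))
def pvSieveArr (M k : Int) : Array Bool :=
  (PySem.List.pyRange 2 k 1).foldl (fun b x => pvMark M b x) (Array.replicate (M + 1).toNat true)

-- the multiples of q in [q, N]
def pvR (N q : Int) : List Int := PySem.List.pyRange q (N + 1) q

-- #(multiples of p in [1,N] that are multiples of q)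
def pvG (N q p : Int) : Int := ((pvR N p).countP (fun x => decide (x ∈ pvR N q)) : Int)

def pairsG (N : Int) : List Int → Int
  | [] => 0
  | p :: rest => ((rest.map (fun r => pvG N p r)).sum) + pairsG N rest

def pairsFgen (f : Int → Int → Int) : List Int → Int
  | [] => 0
  | p :: rest => ((rest.map (f p)).sum) + pairsFgen f rest

def pairsF (N : Int) : List Int → Int := pairsFgen (fun p r => PySem.Int.floordiv N (p * r))

-- ---- sieve correctness ----

lemma pv_setfalse_fold (S : List Int) (hS : ∀ j ∈ S, 0 ≤ j) (b : Array Bool) (i : Nat) :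
    (S.foldl (fun b j => b.setIfInBounds j.toNat false) b).getD i false
      = (b.getD i false && !decide ((i : Int) ∈ S)) := by
  induction S generalizing b with
  | nil => simp
  | cons j S ih =>
    have hj : 0 ≤ j := hS j (by simp)
    have hstep : (b.setIfInBounds j.toNat false).getD i false
        = (b.getD i false && !decide ((i : Int) = j)) := by
      by_cases h : j.toNat = i
      · have hij : (i : Int) = j := by omega
        simp only [hij, decide_true, Bool.not_true, Bool.and_false]
        rw [Array.getD_eq_getD_getElem?, Array.getElem?_setIfInBounds, if_pos h]
        split <;> simp
      · have hij : ¬ ((i : Int) = j) := by omega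
        simp [hij, Array.getD_eq_getD_getElem?, h]
    simp only [List.foldl_cons]
    rw [ih (fun x hx => hS x (by simp [hx])), hstep]
    by_cases h1 : (i : Int) = j <;> by_cases h2 : (i : Int) ∈ S <;>
      simp [h1, h2]

lemma pv_mark_getD (M x : Int) (hx : 0 < x) (b : Array Bool) (i : Nat) :
    (pvMark M b x).getD i false
      = (b.getD i false && !decide (x ∣ (i : Int) ∧ x * x ≤ (i : Int) ∧ (i : Int) ≤ M)) := by
  unfold pvMark
  have hnn : ∀ j ∈ PySem.List.pyRange (x * x) (M + 1) x, 0 ≤ j := by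
    intro j hj
    have h := (PySem.List.mem_pyRange_iff_of_pos hx j).mp hj
    nlinarith [h.1]
  rw [pv_setfalse_fold _ hnn b i]
  congr 2
  rw [decide_eq_decide, PySem.List.mem_pyRange_iff_of_pos hx]
  have hxx : x ∣ x * x := Dvd.intro x rfl
  constructor
  · rintro ⟨h1, h2, h3⟩
    have hdvd : x ∣ (i : Int) := by
      have := dvd_add h3 hxx
      simpa using this
    exact ⟨hdvd, h1, by omega⟩
  · rintro ⟨h1, h2, h3⟩
    exact ⟨h2, by omega, dvd_sub h1 hxx⟩

lemma pv_sieveArr_getD (M : Int) (k : Int) (hk : 2 ≤ k) (i : Nat) (hi : (i : Int) ≤ M) :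
    (pvSieveArr M k).getD i false
      = !decide (∃ d ∈ PySem.List.pyRange 2 k 1, d ∣ (i : Int) ∧ d * d ≤ (i : Int)) := by
  induction k, hk using Int.le_induction with
  | base =>
    unfold pvSieveArr
    rw [PySem.List.pyRange_one_eq_nil (by omega)]
    have hlt : i < (M + 1).toNat := by omega
    simp [Array.getD_eq_getD_getElem?, hlt]
  | succ k hk2 ih =>
    unfold pvSieveArr at ih ⊢
    rw [PySem.List.pyRange_one_succ_right (by omega : (2:Int) ≤ k), List.foldl_append,
      List.foldl_cons, List.foldl_nil, pv_mark_getD M k (by omega), ih]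
    have hsplit : (∃ d ∈ PySem.List.pyRange 2 k 1 ++ [k], d ∣ (i : Int) ∧ d * d ≤ (i : Int))
        ↔ ((∃ d ∈ PySem.List.pyRange 2 k 1, d ∣ (i : Int) ∧ d * d ≤ (i : Int)) ∨
            (k ∣ (i : Int) ∧ k * k ≤ (i : Int) ∧ (i : Int) ≤ M)) := by
      constructor
      · rintro ⟨d, hd, h1, h2⟩
        rcases List.mem_append.mp hd with hd | hd
        · exact Or.inl ⟨d, hd, h1, h2⟩
        · rcases List.mem_singleton.mp hd with rfl
          exact Or.inr ⟨h1, h2, hi⟩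
      · rintro (⟨d, hd, h1, h2⟩ | ⟨h1, h2, _⟩)
        · exact ⟨d, List.mem_append.mpr (Or.inl hd), h1, h2⟩
        · exact ⟨k, List.mem_append.mpr (Or.inr (List.mem_singleton.mpr rfl)), h1, h2⟩
    conv_rhs => rw [decide_eq_decide.mpr hsplit]
    by_cases hA : (∃ d ∈ PySem.List.pyRange 2 k 1, d ∣ (i : Int) ∧ d * d ≤ (i : Int)) <;>
      by_cases hB : (k ∣ (i : Int) ∧ k * k ≤ (i : Int) ∧ (i : Int) ≤ M) <;>
        simp [hA, hB]

lemma pv_composite_iff (x : Int) (hx : 2 ≤ x) :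
    (∃ d : Int, 2 ≤ d ∧ d ∣ x ∧ d * d ≤ x) ↔ ¬ x.toNat.Prime := by
  constructor
  · rintro ⟨d, h2, hdvd, hsq⟩ hp
    have hd0 : (0 : Int) ≤ d := by omega
    have hdx : d < x := by nlinarith
    have hdvd' : d.toNat ∣ x.toNat := by
      rw [← Int.natCast_dvd_natCast, Int.toNat_of_nonneg hd0, Int.toNat_of_nonneg (by omega)]
      exact hdvd
    rcases hp.eq_one_or_self_of_dvd d.toNat hdvd' with h | h <;> omega
  · intro hp
    have hdp : x.toNat.minFac.Prime := Nat.minFac_prime (by omega)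
    have hdvd : x.toNat.minFac ∣ x.toNat := Nat.minFac_dvd _
    have hsq : x.toNat.minFac ^ 2 ≤ x.toNat := Nat.minFac_sq_le_self (by omega) hp
    have h2d : 2 ≤ x.toNat.minFac := hdp.two_le
    refine ⟨(x.toNat.minFac : Int), by exact_mod_cast h2d, ?_, ?_⟩
    · have h : ((x.toNat.minFac : Int)) ∣ (x.toNat : Int) := Int.natCast_dvd_natCast.mpr hdvd
      rwa [Int.toNat_of_nonneg (by omega)] at h
    · have hmul : x.toNat.minFac * x.toNat.minFac ≤ x.toNat := by nlinarith [hsq]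
      have h : ((x.toNat.minFac : Int)) * (x.toNat.minFac : Int) ≤ (x.toNat : Int) := by
        exact_mod_cast hmul
      rwa [Int.toNat_of_nonneg (by omega)] at h

-- bounded ∃ (bound K beyond x) reduces to the unbounded one
lemma pv_bounded_iff (x K : Int) (hx : 2 ≤ x) (hK : x ≤ K) :
    (∃ d ∈ PySem.List.pyRange 2 K 1, d ∣ x ∧ d * d ≤ x) ↔ (∃ d : Int, 2 ≤ d ∧ d ∣ x ∧ d * d ≤ x) := by
  constructor
  · rintro ⟨d, hd, h⟩
    rw [PySem.List.mem_pyRange_one] at hd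
    exact ⟨d, hd.1, h⟩
  · rintro ⟨d, h2, hdvd, hsq⟩
    exact ⟨d, PySem.List.mem_pyRange_one.mpr ⟨h2, by nlinarith⟩, hdvd, hsq⟩

lemma pv_gen_state (M : Int) (hM : 2 ≤ M) (k : Int) (h2 : 2 ≤ k) (hk : k ≤ M + 1) :
    (PySem.List.pyRange 2 k 1).foldl (pvSieveStep M) (Array.replicate (M + 1).toNat true, ([] : List Int))
      = (pvSieveArr M k, (PySem.List.pyRange 2 k 1).filter (fun x => decide x.toNat.Prime)) := by
  induction k, h2 using Int.le_induction with
  | base =>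
    rw [PySem.List.pyRange_one_eq_nil le_rfl]
    unfold pvSieveArr
    rw [PySem.List.pyRange_one_eq_nil le_rfl]
    rfl
  | succ k hk2 ih =>
    have hread : (pvSieveArr M k).getD k.toNat false = decide k.toNat.Prime := by
      have h1 := pv_sieveArr_getD M k hk2 k.toNat (by omega)
      rw [Int.toNat_of_nonneg (by omega : (0:Int) ≤ k)] at h1
      rw [h1]
      have hiff := (pv_bounded_iff k k hk2 le_rfl).trans (pv_composite_iff k hk2)
      by_cases hp : k.toNat.Prime
      · have hno : ¬ ∃ d ∈ PySem.List.pyRange 2 k 1, d ∣ k ∧ d * d ≤ k :=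
          fun hc => (hiff.mp hc) hp
        rw [decide_eq_false hno]
        simp [hp]
      · have hyes : ∃ d ∈ PySem.List.pyRange 2 k 1, d ∣ k ∧ d * d ≤ k := hiff.mpr hp
        rw [decide_eq_true hyes]
        simp [hp]
    rw [PySem.List.pyRange_one_succ_right (by omega : (2:Int) ≤ k), List.foldl_append,
      List.foldl_cons, List.foldl_nil, ih (by omega), List.filter_append]
    have harr : pvSieveArr M (k + 1) = pvMark M (pvSieveArr M k) k := by
      unfold pvSieveArr
      rw [PySem.List.pyRange_one_succ_right (by omega : (2:Int) ≤ k), List.foldl_append,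
        List.foldl_cons, List.foldl_nil]
    unfold pvSieveStep
    rw [hread]
    by_cases hp : k.toNat.Prime
    · simp only [hp, decide_true, if_true, harr]
      refine Prod.ext rfl ?_
      simp [List.filter, hp]
    · simp only [hp, decide_false, Bool.false_eq_true, if_false, harr]
      refine Prod.ext rfl ?_
      simp [List.filter, hp]

lemma pv_get_primes_eq (M : Int) : get_primes M = pyPrimes M := by
  by_cases hM : M < 2
  · unfold get_primes pyPrimes
    rw [if_pos hM, PySem.List.pyRange_one_eq_nil (by omega)]
    rfl
  · unfold get_primes pyPrimes
    rw [if_neg hM, pv_gen_state M (by omega) (M + 1) (by omega) le_rfl]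

lemma pv_b_primes_eq (M : Int) (hM : 2 ≤ M) :
    (PySem.List.pyRange 2 (M + 1) 1).filter (fun d => (pvSieveArr M (M + 1)).getD d.toNat false)
      = pyPrimes M := by
  apply List.filter_congr
  intro d hd
  rw [PySem.List.mem_pyRange_one] at hd
  have h1 := pv_sieveArr_getD M (M + 1) (by omega) d.toNat (by omega)
  rw [Int.toNat_of_nonneg (by omega)] at h1
  rw [h1]
  have hiff := (pv_bounded_iff d (M + 1) (by omega) (by omega)).trans (pv_composite_iff d (by omega))
  by_cases hp : d.toNat.Prime
  · have hno : ¬ ∃ d' ∈ PySem.List.pyRange 2 (M + 1) 1, d' ∣ d ∧ d' * d' ≤ d :=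
      fun hc => (hiff.mp hc) hp
    rw [decide_eq_false hno]
    simp [hp]
  · have hyes : ∃ d' ∈ PySem.List.pyRange 2 (M + 1) 1, d' ∣ d ∧ d' * d' ≤ d := hiff.mpr hp
    rw [decide_eq_true hyes]
    simp [hp]

lemma pyPrimes_mem {M x : Int} (hx : x ∈ pyPrimes M) : 2 ≤ x ∧ x ≤ M ∧ x.toNat.Prime := by
  rcases List.mem_filter.mp hx with ⟨hmem, hp⟩
  rw [PySem.List.mem_pyRange_one] at hmem
  exact ⟨hmem.1, by omega, of_decide_eq_true hp⟩

lemma pyPrimes_nodup (M : Int) : (pyPrimes M).Nodup := by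
  exact (PySem.List.nodup_pyRange_one 2 (M + 1)).filter _

lemma pyPrimes_sorted (M : Int) : (pyPrimes M).Pairwise (· < ·) := by
  exact List.Pairwise.sublist List.filter_sublist (PySem.List.pairwise_lt_pyRange_one 2 (M + 1))

-- ---- the multiples list pvR ----

lemma pvR_eq_map (N q : Int) (hq : 0 < q) :
    pvR N q = (List.range (N / q).toNat).map (fun k : Nat => q * ((k : Int) + 1)) := by
  unfold pvR
  rw [PySem.List.pyRange_of_pos _ _ hq]
  have hcount : (if q < N + 1 then ((N + 1 - q + q - 1) / q).toNat else 0) = (N / q).toNat := by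
    by_cases h : q < N + 1
    · rw [if_pos h]
      have he : N + 1 - q + q - 1 = N := by ring
      rw [he]
    · rw [if_neg h]
      rcases le_or_gt 0 N with hN | hN
      · rw [Int.ediv_eq_zero_of_lt hN (by omega)]
        rfl
      · have := Int.ediv_neg_of_neg_of_pos hN hq
        omega
  rw [hcount]
  apply List.map_congr_left
  intro k _
  ring

lemma pv_mem_R (N q x : Int) (hq : 0 < q) : x ∈ pvR N q ↔ q ∣ x ∧ q ≤ x ∧ x ≤ N := by
  unfold pvR
  rw [PySem.List.mem_pyRange_iff_of_pos hq]
  constructor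
  · rintro ⟨h1, h2, h3⟩
    have hd : q ∣ x := by simpa using dvd_add h3 (dvd_refl q)
    exact ⟨hd, h1, by omega⟩
  · rintro ⟨h1, h2, h3⟩
    exact ⟨h2, by omega, dvd_sub h1 (dvd_refl q)⟩

lemma pvR_nodup (N q : Int) (hq : 0 < q) : (pvR N q).Nodup := by
  rw [pvR_eq_map N q hq]
  refine List.Nodup.map ?_ List.nodup_range
  intro a b h
  have hq0 : q ≠ 0 := by omega
  have := mul_left_cancel₀ hq0 h
  omega

lemma pvR_nonneg (N q : Int) (hq : 0 < q) : ∀ x ∈ pvR N q, 0 ≤ x := by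
  intro x hx
  have := (pv_mem_R N q x hq).mp hx
  omega

-- ---- A's counting loop ----

lemma pv_bump_getD_ne (om : Array Int) (x : Int) (i : Nat) (h : x.toNat ≠ i) :
    (pvBump om x).getD i 0 = om.getD i 0 := by
  simp [pvBump, Array.getD_eq_getD_getElem?, h]

lemma pv_bump_getD (om : Array Int) (x : Int) (i : Nat) (hi : i < om.size) :
    (pvBump om x).getD i 0 = om.getD i 0 + (if x.toNat = i then 1 else 0) := by
  by_cases h : x.toNat = i
  · subst h
    simp [pvBump, Array.getD_eq_getD_getElem?, hi]
  · simp [pv_bump_getD_ne om x i h, h]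

lemma pv_bump_size (om : Array Int) (x : Int) : (pvBump om x).size = om.size := by
  simp [pvBump]

lemma pv_bumpfold_size (xs : List Int) (om : Array Int) : (xs.foldl pvBump om).size = om.size := by
  induction xs generalizing om with
  | nil => rfl
  | cons x xs ih => simp [List.foldl_cons, ih, pv_bump_size]

lemma pv_pass_fold (xs : List Int) (hnd : xs.Nodup) (hpos : ∀ x ∈ xs, 0 ≤ x)
    (c : Int) (om : Array Int) :
    xs.foldl pvCount (c, om)
      = (c + (xs.map (fun x => om.getD x.toNat 0)).sum, xs.foldl pvBump om) := by
  induction xs generalizing c om with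
  | nil => simp
  | cons x xs ih =>
    simp only [List.foldl_cons, List.map_cons, List.sum_cons]
    have hcount : pvCount (c, om) x = (c + om.getD x.toNat 0, pvBump om x) := rfl
    rw [hcount, ih hnd.of_cons (fun y hy => hpos y (by simp [hy]))]
    refine Prod.ext ?_ rfl
    simp only
    have hmap : (xs.map (fun y => (pvBump om x).getD y.toNat 0))
        = xs.map (fun y => om.getD y.toNat 0) := by
      apply List.map_congr_left
      intro y hy
      have hy0 : 0 ≤ y := hpos y (by simp [hy])
      have hx0 : 0 ≤ x := hpos x (by simp)
      have hxy : x ≠ y := fun h => (List.nodup_cons.mp hnd).1 (h ▸ hy)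
      exact pv_bump_getD_ne om x y.toNat (by omega)
    rw [hmap]
    ring

lemma pv_bumpfold_getD (xs : List Int) (om : Array Int) (i : Nat)
    (hpos : ∀ x ∈ xs, 0 ≤ x) (hi : i < om.size) :
    (xs.foldl pvBump om).getD i 0
      = om.getD i 0 + (xs.countP (fun x => decide (x = (i : Int))) : Int) := by
  induction xs generalizing om with
  | nil => simp
  | cons x xs ih =>
    simp only [List.foldl_cons, List.countP_cons]
    rw [ih (pvBump om x) (fun y hy => hpos y (by simp [hy])) (by rwa [pv_bump_size]),
      pv_bump_getD om x i hi]
    have hx0 : 0 ≤ x := hpos x (by simp)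
    by_cases h : x = (i : Int)
    · rw [h]
      simp only [Int.toNat_natCast, decide_true]
      push_cast
      ring
    · have hxi : x.toNat ≠ i := by omega
      rw [if_neg hxi, decide_eq_false h]
      simp

lemma pv_countP_nodup (xs : List Int) (hnd : xs.Nodup) (v : Int) :
    (xs.countP (fun x => decide (x = v)) : Int) = if v ∈ xs then 1 else 0 := by
  induction xs with
  | nil => simp
  | cons x xs ih =>
    rw [List.countP_cons]
    have hih := ih (List.Nodup.of_cons hnd)
    by_cases h : x = v
    · subst h
      have hnx : x ∉ xs := (List.nodup_cons.mp hnd).1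
      rw [if_neg hnx] at hih
      have hz : (List.countP (fun y => decide (y = x)) xs) = 0 := by exact_mod_cast hih
      simp [hz]
    · have hvx : ¬ v = x := fun hh => h hh.symm
      by_cases hv : v ∈ xs
      · rw [if_pos hv] at hih
        simp [h, List.mem_cons, hvx, hv, hih]
      · rw [if_neg hv] at hih
        simp [h, List.mem_cons, hvx, hv, hih]

lemma pv_sum_exchange (xs Q : List Int) (p : Int → Int → Bool) :
    (xs.map (fun x => (Q.countP (fun q => p q x) : Int))).sum
      = (Q.map (fun q => (xs.countP (fun x => p q x) : Int))).sum := by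
  induction Q with
  | nil => simp
  | cons q Q ih =>
    simp only [List.countP_cons, List.map_cons, List.sum_cons]
    have hsplit : (xs.map (fun x => ((Q.countP (fun q' => p q' x) + if p q x then 1 else 0 : Nat) : Int))).sum
        = (xs.map (fun x => (Q.countP (fun q' => p q' x) : Int))).sum
          + (xs.map (fun x => if p q x then (1:Int) else 0)).sum := by
      rw [← PySem.List.sum_map_add_int]
      apply congrArg
      apply List.map_congr_left
      intro x _
      push_cast
      split <;> simp
    rw [hsplit, ih, PySem.List.sum_map_ite_one_zero]
    ring

lemma pv_outer_fold (N : Int) (L : List Int) (Q : List Int) (c : Int) (om : Array Int)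
    (hL : ∀ p ∈ L, 2 ≤ p)
    (hsz : om.size = (N + 1).toNat)
    (hom : ∀ i : Nat, i < om.size →
      om.getD i 0 = (Q.countP (fun q => decide ((i : Int) ∈ pvR N q)) : Int)) :
    (L.foldl (fun st p => (pvR N p).foldl pvCount st) (c, om)).1
      = c + (L.map (fun r => (Q.map (fun q => pvG N q r)).sum)).sum + pairsG N L := by
  induction L generalizing Q c om with
  | nil => simp [pairsG]
  | cons p L ih =>
    have hp2 : 2 ≤ p := hL p (by simp)
    have hppos : (0:Int) < p := by omega
    simp only [List.foldl_cons]
    rw [pv_pass_fold (pvR N p) (pvR_nodup N p hppos) (pvR_nonneg N p hppos) c om]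
    have hsum : ((pvR N p).map (fun x => om.getD x.toNat 0)).sum
        = (Q.map (fun q => pvG N q p)).sum := by
      have h1 : ((pvR N p).map (fun x => om.getD x.toNat 0))
          = ((pvR N p).map (fun x => (Q.countP (fun q => decide (x ∈ pvR N q)) : Int))) := by
        apply List.map_congr_left
        intro x hx
        have hxm := (pv_mem_R N p x hppos).mp hx
        have hb : x.toNat < om.size := by omega
        have hcast : ((x.toNat : Int)) = x := Int.toNat_of_nonneg (by omega)
        rw [hom x.toNat hb, hcast]
      rw [h1, pv_sum_exchange (pvR N p) Q (fun q x => decide (x ∈ pvR N q))]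
      rfl
    have hsz' : ((pvR N p).foldl pvBump om).size = (N + 1).toNat := by
      rw [pv_bumpfold_size]; exact hsz
    have hom' : ∀ i : Nat, i < ((pvR N p).foldl pvBump om).size →
        ((pvR N p).foldl pvBump om).getD i 0
          = ((Q ++ [p]).countP (fun q => decide ((i : Int) ∈ pvR N q)) : Int) := by
      intro i hi'
      rw [pv_bumpfold_size] at hi'
      rw [pv_bumpfold_getD (pvR N p) om i (pvR_nonneg N p hppos) hi', hom i hi',
        List.countP_append]
      have hc := pv_countP_nodup (pvR N p) (pvR_nodup N p hppos) (i : Int)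
      have hcnt : ((pvR N p).countP (fun x => decide (x = (i : Int))) : Int)
          = ([p].countP (fun q => decide ((i : Int) ∈ pvR N q)) : Int) := by
        rw [hc]
        simp only [List.countP_cons, List.countP_nil]
        by_cases hmem : (i : Int) ∈ pvR N p <;> simp [hmem]
      push_cast at hcnt ⊢
      omega
    rw [ih (Q ++ [p]) _ _ (fun r hr => hL r (by simp [hr])) hsz' hom']
    have hre : (L.map (fun r => ((Q ++ [p]).map (fun q => pvG N q r)).sum)).sum
        = (L.map (fun r => (Q.map (fun q => pvG N q r)).sum)).sum
          + (L.map (fun r => pvG N p r)).sum := by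
      rw [← PySem.List.sum_map_add_int]
      apply congrArg
      apply List.map_congr_left
      intro r _
      rw [List.map_append, List.sum_append]
      simp
    rw [hre, hsum]
    simp only [pairsG, List.map_cons, List.sum_cons]
    ring

-- ---- closed form for a pair of distinct primes ----

lemma pv_count_multiples (m A : Nat) :
    (List.range m).countP (fun k => decide (A ∣ (k + 1))) = m / A := by
  induction m with
  | zero => simp
  | succ m ih =>
    rw [List.range_succ, List.countP_append, ih]
    simp only [List.countP_cons, List.countP_nil]
    rw [Nat.succ_div]
    by_cases h : A ∣ m + 1 <;> simp [h]

lemma pvG_eq (N a b : Int) (hN : 0 ≤ N) (ha : a.toNat.Prime) (hb : b.toNat.Prime)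
    (h2a : 2 ≤ a) (h2b : 2 ≤ b) (hne : a ≠ b) :
    pvG N a b = PySem.Int.floordiv N (a * b) := by
  have hbpos : (0:Int) < b := by omega
  have hapos : (0:Int) < a := by omega
  have hcop : a.toNat.Coprime b.toNat :=
    (Nat.coprime_primes ha hb).mpr (fun h => hne (by omega))
  unfold pvG
  rw [pvR_eq_map N b hbpos, List.countP_map]
  have hcong : ∀ k ∈ List.range (N / b).toNat,
      (decide (b * ((k : Int) + 1) ∈ pvR N a)) = decide (a.toNat ∣ (k + 1)) := by
    intro k hk
    rw [List.mem_range] at hk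
    rw [decide_eq_decide, pv_mem_R N a _ hapos]
    have hxcast : b * ((k : Int) + 1) = ((b.toNat * (k + 1) : Nat) : Int) := by
      push_cast
      rw [Int.toNat_of_nonneg (by omega)]
    have hacast : a = ((a.toNat : Nat) : Int) := by
      rw [Int.toNat_of_nonneg (by omega)]
    constructor
    · rintro ⟨h1, _, _⟩
      rw [hxcast, hacast, Int.natCast_dvd_natCast] at h1
      exact hcop.dvd_of_dvd_mul_left h1
    · intro h1
      have hdvd : a ∣ b * ((k : Int) + 1) := by
        rw [hxcast, hacast, Int.natCast_dvd_natCast]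
        exact Dvd.dvd.mul_left h1 b.toNat
      refine ⟨hdvd, Int.le_of_dvd (by nlinarith) hdvd, ?_⟩
      have hk1 : ((k : Int) + 1) ≤ N / b := by
        have : (0:Int) ≤ N / b := Int.ediv_nonneg hN (by omega)
        omega
      have := (Int.le_ediv_iff_mul_le hbpos).mp hk1
      nlinarith
  have hcong2 : ∀ k ∈ List.range (N / b).toNat,
      (((fun x => decide (x ∈ pvR N a)) ∘ fun k : Nat => b * ((k : Int) + 1)) k = true
        ↔ (fun k : Nat => decide (a.toNat ∣ (k + 1))) k = true) := by
    intro k hk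
    simp only [Function.comp]
    rw [hcong k hk]
  rw [List.countP_congr hcong2, pv_count_multiples]
  have h1 : (((N / b).toNat / a.toNat : Nat) : Int) = (N / b) / a := by
    rw [Int.natCast_div, Int.toNat_of_nonneg (Int.ediv_nonneg hN (by omega)),
      Int.toNat_of_nonneg (by omega)]
  rw [h1, Int.ediv_ediv_of_nonneg (by omega), mul_comm b a,
    PySem.Int.floordiv_eq_ediv_of_pos (by positivity)]

lemma pv_pairsG_eq_pairsF (N : Int) (L : List Int) (hN : 0 ≤ N)
    (hL : ∀ p ∈ L, 2 ≤ p ∧ p.toNat.Prime) (hnd : L.Nodup) :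
    pairsG N L = pairsF N L := by
  induction L with
  | nil => rfl
  | cons p L ih =>
    have hp := hL p (by simp)
    have hstep : pairsF N (p :: L)
        = ((L.map (fun r => PySem.Int.floordiv N (p * r))).sum) + pairsF N L := rfl
    rw [hstep, ← ih (fun r hr => hL r (by simp [hr])) (List.Nodup.of_cons hnd)]
    simp only [pairsG]
    have hmapeq : (L.map (fun r => pvG N p r)) = L.map (fun r => PySem.Int.floordiv N (p * r)) := by
      apply List.map_congr_left
      intro r hr
      have hrr := hL r (by simp [hr])
      have hpr : p ≠ r := fun h => (List.nodup_cons.mp hnd).1 (h ▸ hr)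
      exact pvG_eq N p r hN hp.2 hrr.2 hp.1 hrr.1 hpr
    rw [hmapeq]

-- ---- B's pair loop ----

lemma pv_getD_mono (P : List Int) (hs : P.Pairwise (· ≤ ·)) (a j : Nat)
    (haj : a < j) (hj : j < P.length) :
    P.getD a 0 ≤ P.getD j 0 := by
  rw [List.pairwise_iff_getElem] at hs
  have h := hs a j (by omega) hj haj
  rw [List.getD_eq_getElem?_getD, List.getD_eq_getElem?_getD,
    List.getElem?_eq_getElem (by omega : a < P.length), List.getElem?_eq_getElem hj]
  simpa using h

lemma pv_row_eq (N p : Int) (P : List Int) (hp : 0 < p) (hN : 0 ≤ N)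
    (hs : P.Pairwise (· ≤ ·)) :
    ∀ (n : Nat) (a : Int) (acc : Int), 0 ≤ a → a + n = P.length →
      pvRow N p P (PySem.List.pyRange a (P.length : Int) 1) acc
        = acc + ((PySem.List.pyRange a (P.length : Int) 1).map
            (fun j => PySem.Int.floordiv N (p * PySem.List.pyGetD P j 0))).sum := by
  intro n
  induction n with
  | zero =>
    intro a acc ha hlen
    rw [PySem.List.pyRange_one_eq_nil (by push_cast at hlen ⊢; omega)]
    simp [pvRow]
  | succ n ih =>
    intro a acc ha hlen
    have halt : a < (P.length : Int) := by push_cast at hlen ⊢; omega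
    rw [PySem.List.pyRange_one_cons halt]
    simp only [pvRow, List.map_cons, List.sum_cons]
    by_cases hbr : p * PySem.List.pyGetD P a 0 > N
    · rw [if_pos hbr]
      have hmono : ∀ j : Int, a < j → j < (P.length : Int) →
          PySem.List.pyGetD P a 0 ≤ PySem.List.pyGetD P j 0 := by
        intro j hj1 hj2
        rw [PySem.List.pyGetD_eq_getElem P 0 ha halt,
          PySem.List.pyGetD_eq_getElem P 0 (by omega) hj2]
        have h2 := pv_getD_mono P hs a.toNat j.toNat (by omega) (by omega)
        rwa [List.getD_eq_getElem P 0 (by omega), List.getD_eq_getElem P 0 (by omega)] at h2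
      have hz : ∀ j ∈ PySem.List.pyRange (a + 1) (P.length : Int) 1,
          PySem.Int.floordiv N (p * PySem.List.pyGetD P j 0) = 0 := by
        intro j hj
        rw [PySem.List.mem_pyRange_one] at hj
        have hle : p * PySem.List.pyGetD P a 0 ≤ p * PySem.List.pyGetD P j 0 :=
          mul_le_mul_of_nonneg_left (hmono j (by omega) hj.2) (le_of_lt hp)
        have hm : N < p * PySem.List.pyGetD P j 0 := lt_of_lt_of_le hbr hle
        rw [PySem.Int.floordiv_eq_ediv_of_pos (lt_of_le_of_lt hN hm)]
        exact Int.ediv_eq_zero_of_lt hN hm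
      have hza : PySem.Int.floordiv N (p * PySem.List.pyGetD P a 0) = 0 := by
        rw [PySem.Int.floordiv_eq_ediv_of_pos (lt_of_le_of_lt hN hbr)]
        exact Int.ediv_eq_zero_of_lt hN hbr
      have hmap : ((PySem.List.pyRange (a + 1) (P.length : Int) 1).map
            (fun j => PySem.Int.floordiv N (p * PySem.List.pyGetD P j 0)))
          = (PySem.List.pyRange (a + 1) (P.length : Int) 1).map (fun _ => (0 : Int)) :=
        List.map_congr_left hz
      rw [hza, hmap]
      simp
    · rw [if_neg hbr]
      rw [ih (a + 1) (acc + PySem.Int.floordiv N (p * PySem.List.pyGetD P a 0)) (by omega)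
        (by push_cast at hlen ⊢; omega)]
      ring

lemma pv_idx_pairs (f : Int → Int → Int) (P : List Int) :
    ((List.range P.length).map (fun i => ((P.drop (i + 1)).map (f (P.getD i 0))).sum)).sum
      = pairsFgen f P := by
  induction P with
  | nil => simp [pairsFgen]
  | cons p P ih =>
    have hlen : (p :: P).length = P.length + 1 := rfl
    rw [hlen, List.range_succ_eq_map]
    simp only [List.map_cons, List.sum_cons, List.map_map]
    have htail : ((List.range P.length).map
          ((fun i => (((p :: P).drop (i + 1)).map (f ((p :: P).getD i 0))).sum) ∘ Nat.succ))
        = (List.range P.length).map (fun i => ((P.drop (i + 1)).map (f (P.getD i 0))).sum) := by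
      apply List.map_congr_left
      intro i _
      simp [Function.comp]
    rw [htail, ih]
    rfl

lemma pv_b_primes_eq' (M : Int) (hM : 2 ≤ M) :
    (PySem.List.pyRange 2 (M + 1) 1).filter (fun d =>
      ((PySem.List.pyRange 2 (M + 1) 1).foldl (fun b d => pvMark M b d)
        (Array.replicate (M + 1).toNat true)).getD d.toNat false) = pyPrimes M :=
  pv_b_primes_eq M hM

lemma pv_b_eq (N : Int) (hN : 0 ≤ N) (P : List Int) (hs2 : P.Pairwise (· < ·))
    (hmem : ∀ p ∈ P, 2 ≤ p) :
    (PySem.List.pyRange 0 (P.length : Int) 1).foldl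
      (fun total i => pvRow N (PySem.List.pyGetD P i 0) P
        (PySem.List.pyRange (i + 1) (P.length : Int) 1) total) 0
    = pairsF N P := by
  have hs : P.Pairwise (· ≤ ·) := hs2.imp le_of_lt
  have hbody : ∀ (total : Int), ∀ i ∈ PySem.List.pyRange 0 (P.length : Int) 1,
      pvRow N (PySem.List.pyGetD P i 0) P (PySem.List.pyRange (i + 1) (P.length : Int) 1) total
      = total + ((PySem.List.pyRange (i + 1) (P.length : Int) 1).map
          (fun j => PySem.Int.floordiv N (PySem.List.pyGetD P i 0 * PySem.List.pyGetD P j 0))).sum := by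
    intro total i hi
    rw [PySem.List.mem_pyRange_one] at hi
    have hp2 : 2 ≤ PySem.List.pyGetD P i 0 := by
      rw [PySem.List.pyGetD_eq_getElem P 0 hi.1 hi.2]
      exact hmem _ (List.getElem_mem _)
    obtain ⟨n, hn⟩ : ∃ n : Nat, (i + 1) + (n : Int) = (P.length : Int) :=
      ⟨(P.length - (i.toNat + 1)), by omega⟩
    exact pv_row_eq N (PySem.List.pyGetD P i 0) P (by omega) hN hs n (i + 1) total (by omega) hn
  rw [PySem.List.foldl_congr_mem _ _
    (fun total i => total + ((PySem.List.pyRange (i + 1) (P.length : Int) 1).map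
          (fun j => PySem.Int.floordiv N (PySem.List.pyGetD P i 0 * PySem.List.pyGetD P j 0))).sum)
    0 (fun total i hi => hbody total i hi),
    PySem.List.foldl_add, zero_add]
  have hrow : ∀ i ∈ PySem.List.pyRange 0 (P.length : Int) 1,
      ((PySem.List.pyRange (i + 1) (P.length : Int) 1).map
          (fun j => PySem.Int.floordiv N (PySem.List.pyGetD P i 0 * PySem.List.pyGetD P j 0))).sum
      = ((P.drop (i + 1).toNat).map
          (fun q => PySem.Int.floordiv N (PySem.List.pyGetD P i 0 * q))).sum := by
    intro i hi
    rw [PySem.List.mem_pyRange_one] at hi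
    rw [show (fun j => PySem.Int.floordiv N (PySem.List.pyGetD P i 0 * PySem.List.pyGetD P j 0))
        = (fun q => PySem.Int.floordiv N (PySem.List.pyGetD P i 0 * q))
            ∘ (fun j => PySem.List.pyGetD P j 0) from rfl,
      ← List.map_map, PySem.List.map_pyGetD_pyRange' P 0 (by omega : (0:Int) ≤ i + 1)]
  rw [List.map_congr_left hrow, PySem.List.pyRange_one 0 (P.length : Int), List.map_map]
  have hfin : ((fun i : Int => ((P.drop (i + 1).toNat).map
        (fun q => PySem.Int.floordiv N (PySem.List.pyGetD P i 0 * q))).sum)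
          ∘ (fun k : Nat => (0 : Int) + (k : Int)))
      = fun k : Nat => ((P.drop (k + 1)).map
          (fun r => (fun p r => PySem.Int.floordiv N (p * r)) (P.getD k 0) r)).sum := by
    funext k
    simp only [Function.comp, zero_add, PySem.List.pyGetD_natCast]
    rw [show ((k : Int) + 1).toNat = k + 1 by omega]
  rw [show ((P.length : Int) - 0).toNat = P.length by omega, hfin,
    pv_idx_pairs (fun p r => PySem.Int.floordiv N (p * r)) P]
  rfl

-- ===== VERDICT (by name: the statement is the Claim_ definition above) =====
theorem get_count_nums_primes_divisible_spec : Claim_equal_get_count_nums_primes_divisible := by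
  intro N _
  unfold Spec_get_count_nums_primes_divisible
  show get_count_nums_primes_divisible N = get_count_nums_primes_divisible_alt N
  unfold get_count_nums_primes_divisible get_count_nums_primes_divisible_alt
  simp only []
  by_cases hM2 : PySem.Int.floordiv N 2 < 2
  · rw [if_pos hM2, pv_get_primes_eq]
    unfold pyPrimes
    rw [PySem.List.pyRange_one_eq_nil (by omega)]
    rfl
  · rw [if_neg hM2]
    have hfd : PySem.Int.floordiv N 2 = N / 2 := PySem.Int.floordiv_eq_ediv_of_pos (by norm_num)
    have hN4 : (4:Int) ≤ N := by
      have h22 : (2:Int) ≤ N / 2 := by rw [← hfd]; omega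
      have := (Int.le_ediv_iff_mul_le (by norm_num : (0:Int) < 2)).mp h22
      omega
    have hN0 : (0:Int) ≤ N := by omega
    rw [pv_get_primes_eq, pv_b_primes_eq' (PySem.Int.floordiv N 2) (by omega)]
    have hA := pv_outer_fold N (pyPrimes (PySem.Int.floordiv N 2)) [] 0
      (Array.replicate (N + 1).toNat 0)
      (fun p hp => (pyPrimes_mem hp).1) (by simp)
      (fun i hi => by
        simp [Array.getD_eq_getD_getElem?,
          (by simpa using hi : i < (N + 1).toNat)])
    simp only [pvR] at hA
    rw [hA, pv_b_eq N hN0 _ (pyPrimes_sorted _) (fun p hp => (pyPrimes_mem hp).1),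
      pv_pairsG_eq_pairsF N _ hN0
        (fun p hp => ⟨(pyPrimes_mem hp).1, (pyPrimes_mem hp).2.2⟩) (pyPrimes_nodup _)]
    simp
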